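-- pv_equiv track=rewrite | github.com/leehoon7/IE536_Project | main.py | check_satisfy_constraint
-- ===== SOURCE A (Python) =====
-- def check_satisfy_constraint(group, group_tag, constraint, idx):
--
--     if len(constraint) == 0:
--         return True
--
--     for i, tag_i in enumerate(group_tag):
--         for tag_j in group_tag[i+1:]:
--             if tag_i == tag_j:
--                 return False
--
--     if group_tag[idx]:
--         for group_elem in group[idx]:
--             if group_elem in constraint.keys():
--                 if not group_tag[idx] in constraint[group_elem]:
--                     return False
--
--     return True
-- ===== SOURCE B (Python) =====
-- def check_satisfy_constraint(group, group_tag, constraint, idx):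
--     if len(constraint) == 0:
--         return True
--     if len(set(group_tag)) != len(group_tag):
--         return False
--     tag = group_tag[idx]
--     if not tag:
--         return True
--     return all(tag in constraint[elem] for elem in group[idx] if elem in constraint)
-- ===== Notes on version B (the rewrite author's own statement) =====
-- stated objective: simpler
-- what changed: Replaces the nested O(n^2) duplicate-detection double loop with a single set construction plus length comparison, and replaces the early-return constraint loop with a generator-based all() over the dict lookups.
import Mathlib
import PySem

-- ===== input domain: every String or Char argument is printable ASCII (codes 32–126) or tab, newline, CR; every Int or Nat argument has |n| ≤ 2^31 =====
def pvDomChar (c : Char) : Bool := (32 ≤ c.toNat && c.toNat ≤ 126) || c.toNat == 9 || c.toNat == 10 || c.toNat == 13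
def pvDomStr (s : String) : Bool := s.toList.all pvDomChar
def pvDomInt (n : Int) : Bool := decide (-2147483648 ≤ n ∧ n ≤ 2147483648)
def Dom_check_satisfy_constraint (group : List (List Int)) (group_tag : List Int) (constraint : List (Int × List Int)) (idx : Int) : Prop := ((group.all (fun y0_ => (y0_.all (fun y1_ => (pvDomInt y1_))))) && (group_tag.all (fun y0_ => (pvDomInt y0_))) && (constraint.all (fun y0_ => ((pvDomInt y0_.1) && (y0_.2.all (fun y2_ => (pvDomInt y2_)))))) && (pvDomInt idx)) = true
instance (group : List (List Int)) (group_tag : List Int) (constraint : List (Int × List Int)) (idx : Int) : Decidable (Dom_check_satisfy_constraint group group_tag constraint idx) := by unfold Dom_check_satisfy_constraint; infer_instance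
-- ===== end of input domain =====

-- B is a simpler re-implementation: one set-length comparison replaces A's nested duplicate scan,
-- and an all() over dict lookups replaces A's early-return loop. Same return value on Pre_.

-- ===== PORT A =====
-- A's nested duplicate scan: for each tag, compare against every later tag.
def pvDupScanA : List Int → Bool
  | [] => false
  | t :: rest => if rest.any (fun u => t == u) then true else pvDupScanA rest

-- A's constraint loop: early return False when a constrained element disallows tag.
def pvConsLoopA (g : List Int) (constraint : PySem.Dict Int (List Int)) (tag : Int) : Bool :=
  match g with
  | [] => true
  | e :: rest =>
    if constraint.contains e then
      if !((constraint.getD e []).contains tag) then false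
      else pvConsLoopA rest constraint tag
    else pvConsLoopA rest constraint tag

def check_satisfy_constraint (group : List (List Int)) (group_tag : List Int) (constraint : List (Int × List Int)) (idx : Int) : Bool :=
  if constraint.length = 0 then true
  else if pvDupScanA group_tag then false
  else
    match PySem.List.pyGet? group_tag idx with
    | none => false  -- IndexError in Python; excluded by Pre_
    | some tag =>
      if tag ≠ 0 then
        match PySem.List.pyGet? group idx with
        | none => false  -- IndexError in Python; excluded by Pre_
        | some g => pvConsLoopA g (PySem.Dict.mk constraint) tag
      else true

-- ===== PORT B =====
def check_satisfy_constraint_alt (group : List (List Int)) (group_tag : List Int) (constraint : List (Int × List Int)) (idx : Int) : Bool :=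
  if constraint.length = 0 then true
  else if (PySem.Set.ofList group_tag).length ≠ group_tag.length then false
  else
    match PySem.List.pyGet? group_tag idx with
    | none => false  -- IndexError in Python; excluded by Pre_
    | some tag =>
      if tag = 0 then true
      else
        match PySem.List.pyGet? group idx with
        | none => false  -- IndexError in Python; excluded by Pre_
        | some g =>
          (g.filter (fun e => (PySem.Dict.mk constraint).contains e)).all
            (fun e => ((PySem.Dict.mk constraint).getD e []).contains tag)

-- ===== PRECONDITION & SPEC =====
-- Pre_ excludes exactly the inputs where Python A raises IndexError when indexing
-- group_tag[idx] or group[idx]; both ports return false there, so they still agree.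
def Pre_check_satisfy_constraint (group : List (List Int)) (group_tag : List Int) (constraint : List (Int × List Int)) (idx : Int) : Prop :=
  constraint = [] ∨ ¬ group_tag.Nodup ∨
    (PySem.Raise.InRange group_tag.length idx ∧
      (PySem.List.pyGetD group_tag idx 0 ≠ 0 → PySem.Raise.InRange group.length idx))
instance (group : List (List Int)) (group_tag : List Int) (constraint : List (Int × List Int)) (idx : Int) : Decidable (Pre_check_satisfy_constraint group group_tag constraint idx) := by unfold Pre_check_satisfy_constraint; infer_instance

def pvWitness_check_satisfy_constraint : List (List Int) × List Int × (List (Int × List Int)) × Int :=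
  ([[1, 2], [3]], [5, 7], [(1, [5, 6]), (3, [7])], 0)

def Spec_check_satisfy_constraint (group : List (List Int)) (group_tag : List Int) (constraint : List (Int × List Int)) (idx : Int) (out : Bool) : Prop := out = check_satisfy_constraint_alt group group_tag constraint idx
instance (group : List (List Int)) (group_tag : List Int) (constraint : List (Int × List Int)) (idx : Int) (out : Bool) : Decidable (Spec_check_satisfy_constraint group group_tag constraint idx out) := by unfold Spec_check_satisfy_constraint; infer_instance

-- ===== CLAIM (what is proved, stated in full; the proofs are below) =====
def Claim_equal_check_satisfy_constraint : Prop := ∀ (group : List (List Int)) (group_tag : List Int) (constraint : List (Int × List Int)) (idx : Int), Dom_check_satisfy_constraint group group_tag constraint idx → Pre_check_satisfy_constraint group group_tag constraint idx → Spec_check_satisfy_constraint group group_tag constraint idx (check_satisfy_constraint group group_tag constraint idx)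

-- ===== LEMMAS AND PROOFS =====

-- A's nested scan detects exactly non-Nodup lists.
theorem pvDupScanA_eq (l : List Int) : pvDupScanA l = !decide l.Nodup := by
  induction l with
  | nil => simp [pvDupScanA]
  | cons t rest ih =>
    simp only [pvDupScanA, ih, List.nodup_cons]
    by_cases h : t ∈ rest
    · simp [List.any_eq_true, h]
    · have hfalse : rest.any (fun u => t == u) = false := by
        simp only [List.any_eq_false]
        intro x hx hxe
        exact h ((beq_iff_eq.mp hxe) ▸ hx)
      simp [hfalse, h]

-- set(l) is a sublist of l (first occurrences in order).
theorem pvOfList_sublist (l : List Int) : (PySem.Set.ofList l).Sublist l := by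
  induction l using List.reverseRecOn with
  | nil => simp [PySem.Set.ofList_nil]
  | append_singleton xs x ih =>
    rw [PySem.Set.ofList_append_singleton]
    simp only [PySem.Set.add]
    split
    · exact ih.trans (List.sublist_append_left xs [x])
    · exact ih.append (List.Sublist.refl [x])

-- B's set-length test detects exactly non-Nodup lists.
theorem pvSetLen_eq (l : List Int) : ((PySem.Set.ofList l).length ≠ l.length) ↔ ¬ l.Nodup := by
  constructor
  · intro h hnd
    exact h (congrArg List.length (PySem.Set.ofList_eq_self_of_nodup l hnd))
  · intro hnd h
    have he : PySem.Set.ofList l = l := (pvOfList_sublist l).eq_of_length h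
    exact hnd (he ▸ PySem.Set.nodup_ofList l)

-- A's early-return loop equals B's filter-all.
theorem pvConsLoopA_eq (g : List Int) (d : PySem.Dict Int (List Int)) (tag : Int) :
    pvConsLoopA g d tag =
      (g.filter (fun e => d.contains e)).all (fun e => (d.getD e []).contains tag) := by
  induction g with
  | nil => rfl
  | cons e rest ih =>
    simp only [pvConsLoopA, List.filter_cons]
    by_cases hc : d.contains e
    · simp only [hc, if_true, List.all_cons, ih]
      cases hm : (d.getD e []).contains tag
      · simp
      · simp [hm]
    · simp [hc, ih]

-- ===== VERDICT (by name: the statement is the Claim_ definition above) =====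
theorem check_satisfy_constraint_spec : Claim_equal_check_satisfy_constraint := by
  intro group group_tag constraint idx _ _
  unfold Spec_check_satisfy_constraint check_satisfy_constraint check_satisfy_constraint_alt
  by_cases hc : constraint.length = 0
  · simp [hc]
  · simp only [hc, if_false]
    by_cases hnd : group_tag.Nodup
    · have h1 : pvDupScanA group_tag = false := by simp [pvDupScanA_eq, hnd]
      have h2 : ¬ ((PySem.Set.ofList group_tag).length ≠ group_tag.length) := by
        rw [pvSetLen_eq group_tag]; exact not_not_intro hnd
      simp only [h1, if_neg h2]
      cases hg : PySem.List.pyGet? group_tag idx with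
      | none => rfl
      | some tag =>
        by_cases ht : tag = 0
        · simp [ht]
        · simp only [ht, ne_eq, not_false_eq_true, if_true]
          cases hgr : PySem.List.pyGet? group idx with
          | none => rfl
          | some g => exact pvConsLoopA_eq g (PySem.Dict.mk constraint) tag
    · have h1 : pvDupScanA group_tag = true := by simp [pvDupScanA_eq, hnd]
      have h2 : (PySem.Set.ofList group_tag).length ≠ group_tag.length := (pvSetLen_eq group_tag).mpr hnd
      simp [h1, h2]
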